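-- pv_equiv track=rewrite | github.com/ricktjwong/astronomical-image-processing | modules/mask.py | mask_circle
-- ===== SOURCE A (Python) =====
-- def mask_circle(data, centre, radius):
--     max_y, min_y = centre[1] + radius, centre[1] - radius
--     max_x, min_x = centre[0] + radius, centre[0] - radius
--     for i in range(min_y, max_y + 1):
--         for j in range(min_x, max_x + 1):
--             if ((i - centre[1]) ** 2  + (j - centre[0])**2) <= (radius * radius):
--                 data[i][j] = 0
--     return data
-- ===== SOURCE B (Python) =====
-- def _isqrt(n):
--     # Newton's method integer square root (floor of sqrt(n) for n >= 0)
--     if n <= 1: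
--         return n
--     guess = 1 << (((n.bit_length() - 1) // 2) + 1)
--     while True:
--         nxt = (guess + n // guess) // 2
--         if nxt < guess:
--             guess = nxt
--         else:
--             return guess
--
--
-- def mask_circle(data, centre, radius):
--     cx, cy = centre[0], centre[1]
--     r2 = radius * radius
--     for i in range(cy - radius, cy + radius + 1):
--         rem = r2 - (i - cy) * (i - cy)
--         if rem < 0:
--             continue
--         dx = _isqrt(rem)
--         for j in range(cx - dx, cx + dx + 1):
--             data[i][j] = 0
--     return data
-- ===== Notes on version B (the rewrite author's own statement) =====
-- stated objective: alternative
-- what changed: Instead of testing every cell of the (2r+1)x(2r+1) bounding box against the squared-distance condition, B computes per row the circle's exact horizontal span via a hand-written Newton integer square root and zeroes only that contiguous range.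
import Mathlib
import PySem

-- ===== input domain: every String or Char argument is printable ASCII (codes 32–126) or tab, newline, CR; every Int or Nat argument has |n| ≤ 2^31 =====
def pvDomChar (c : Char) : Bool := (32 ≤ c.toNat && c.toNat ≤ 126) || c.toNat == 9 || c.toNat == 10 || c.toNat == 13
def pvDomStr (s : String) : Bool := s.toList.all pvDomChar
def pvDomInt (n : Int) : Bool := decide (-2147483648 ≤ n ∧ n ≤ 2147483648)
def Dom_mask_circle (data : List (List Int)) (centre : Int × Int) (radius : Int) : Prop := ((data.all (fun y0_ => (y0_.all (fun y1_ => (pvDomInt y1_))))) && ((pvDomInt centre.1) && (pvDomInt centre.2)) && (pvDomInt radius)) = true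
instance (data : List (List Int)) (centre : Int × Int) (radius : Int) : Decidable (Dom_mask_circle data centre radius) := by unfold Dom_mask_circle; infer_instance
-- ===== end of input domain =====

-- B replaces A's per-cell distance test over the whole bounding box by computing, per row,
-- the circle's horizontal span with an exact integer square root (alternative decomposition).
-- Both Pythons mutate `data` in place identically; the equivalence proved is about the return value.

-- ===== PORT A =====
-- data[i][j] = 0 with Python index semantics; total pyGetD/pySetD forms, exact on indices
-- that are in range, which Pre_mask_circle guarantees for every assigned cell.
def pvSet2 (d : List (List Int)) (i j : Int) : List (List Int) :=
  PySem.List.pySetD d i (PySem.List.pySetD (PySem.List.pyGetD d i []) j 0)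

def mask_circle (data : List (List Int)) (centre : Int × Int) (radius : Int) : List (List Int) :=
  let max_y := centre.2 + radius
  let min_y := centre.2 - radius
  let max_x := centre.1 + radius
  let min_x := centre.1 - radius
  (PySem.List.pyRange min_y (max_y + 1) 1).foldl (fun d i =>
    (PySem.List.pyRange min_x (max_x + 1) 1).foldl (fun d j =>
      if (i - centre.2) ^ 2 + (j - centre.1) ^ 2 ≤ radius * radius then pvSet2 d i j else d) d)
    data

-- ===== PORT B =====
-- Source B's hand-written Newton integer square root, transcribed step for step.
-- (Python's `n.bit_length() - 1` is `Nat.log2 n` for n ≥ 2, the only case that reaches it.)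
def pvIsqrtIter (n guess : Nat) : Nat :=
  let next := (guess + n / guess) / 2
  if next < guess then pvIsqrtIter n next else guess
termination_by guess

def pvIsqrt (n : Nat) : Nat :=
  if n ≤ 1 then n else pvIsqrtIter n (1 <<< (n.log2 / 2 + 1))

def mask_circle_alt (data : List (List Int)) (centre : Int × Int) (radius : Int) : List (List Int) :=
  let cx := centre.1
  let cy := centre.2
  let r2 := radius * radius
  (PySem.List.pyRange (cy - radius) (cy + radius + 1) 1).foldl (fun d i =>
    let rem := r2 - (i - cy) * (i - cy)
    if rem < 0 then d
    else
      let dx : Int := (pvIsqrt rem.toNat : Nat)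
      (PySem.List.pyRange (cx - dx) (cx + dx + 1) 1).foldl (fun d j => pvSet2 d i j) d)
    data

-- ===== PRECONDITION & SPEC =====
-- Pre_ excludes exactly the inputs where Python A raises IndexError: some cell inside the
-- circle is not a valid (possibly negative) Python index into data / its row; by interval-ness
-- of validity it suffices to check the extreme assigned rows and, per row, the two span endpoints.
def Pre_mask_circle (data : List (List Int)) (centre : Int × Int) (radius : Int) : Prop :=
  radius < 0 ∨
  (PySem.Raise.InRange data.length (centre.2 - radius) ∧
   PySem.Raise.InRange data.length (centre.2 + radius) ∧
   ∀ i ∈ PySem.List.pyRange (centre.2 - radius) (centre.2 + radius + 1) 1,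
     PySem.Raise.InRange (PySem.List.pyGetD data i []).length
       (centre.1 - (Nat.sqrt (radius * radius - (i - centre.2) * (i - centre.2)).toNat : Nat)) ∧
     PySem.Raise.InRange (PySem.List.pyGetD data i []).length
       (centre.1 + (Nat.sqrt (radius * radius - (i - centre.2) * (i - centre.2)).toNat : Nat)))

instance (data : List (List Int)) (centre : Int × Int) (radius : Int) : Decidable (Pre_mask_circle data centre radius) := by
  unfold Pre_mask_circle; infer_instance

def pvWitness_mask_circle : List (List Int) × (Int × Int) × Int :=
  ([[1, 2, 3], [4, 5, 6], [7, 8, 9]], (1, 1), 1)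

def Spec_mask_circle (data : List (List Int)) (centre : Int × Int) (radius : Int) (out : List (List Int)) : Prop := out = mask_circle_alt data centre radius
instance (data : List (List Int)) (centre : Int × Int) (radius : Int) (out : List (List Int)) : Decidable (Spec_mask_circle data centre radius out) := by unfold Spec_mask_circle; infer_instance

-- ===== CLAIM (what is proved, stated in full; the proofs are below) =====
def Claim_equal_mask_circle : Prop := ∀ (data : List (List Int)) (centre : Int × Int) (radius : Int), Dom_mask_circle data centre radius → Pre_mask_circle data centre radius → Spec_mask_circle data centre radius (mask_circle data centre radius)

-- ===== LEMMAS AND PROOFS =====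

theorem pvIsqrtIter_eq (n g : Nat) : pvIsqrtIter n g = Nat.sqrt.iter n g := by
  fun_induction pvIsqrtIter n g with
  | case1 n g h ih => rw [Nat.sqrt.iter]; rw [dif_pos h]; exact ih
  | case2 n g h => rw [Nat.sqrt.iter]; rw [dif_neg h]

theorem pvIsqrt_eq (n : Nat) : pvIsqrt n = Nat.sqrt n := by
  unfold pvIsqrt Nat.sqrt
  split
  · rfl
  · exact pvIsqrtIter_eq _ _

theorem pvFoldl_congr {α β : Type} (l : List α) (f g : β → α → β) (d : β)
    (h : ∀ d x, x ∈ l → f d x = g d x) : l.foldl f d = l.foldl g d := by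
  induction l generalizing d with
  | nil => rfl
  | cons x xs ih =>
    simp only [List.foldl_cons]
    rw [h d x (by simp)]
    exact ih _ (fun d y hy => h d y (by simp [hy]))

theorem pvFoldl_if_false {β : Type} (l : List Int) (p : Int → Prop) [DecidablePred p]
    (f : β → Int → β) (d : β) (h : ∀ x ∈ l, ¬ p x) :
    l.foldl (fun d j => if p j then f d j else d) d = d := by
  induction l generalizing d with
  | nil => rfl
  | cons x xs ih =>
    simp only [List.foldl_cons, if_neg (h x (by simp))]
    exact ih d (fun y hy => h y (by simp [hy]))

theorem pvFoldl_if_true {β : Type} (l : List Int) (p : Int → Prop) [DecidablePred p]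
    (f : β → Int → β) (d : β) (h : ∀ x ∈ l, p x) :
    l.foldl (fun d j => if p j then f d j else d) d = l.foldl f d :=
  pvFoldl_congr l _ f d (fun _ x hx => if_pos (h x hx))

-- the per-row lemma: testing every j in the bounding row against the distance condition
-- equals iterating exactly the span [cx - dx, cx + dx], dx = Nat.sqrt (r*r - q).
theorem pvRow {β : Type} (cx r q : Int) (hq0 : 0 ≤ q) (hqr : q ≤ r * r) (hr : 0 ≤ r)
    (f : β → Int → β) (d : β) :
    (PySem.List.pyRange (cx - r) (cx + r + 1) 1).foldl
      (fun d j => if q + (j - cx) ^ 2 ≤ r * r then f d j else d) d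
    = (PySem.List.pyRange (cx - ((Nat.sqrt (r * r - q).toNat : Nat) : Int))
        (cx + ((Nat.sqrt (r * r - q).toNat : Nat) : Int) + 1) 1).foldl f d := by
  set dxN : Nat := Nat.sqrt (r * r - q).toNat with hdx
  have hrem0 : (0 : Int) ≤ r * r - q := by omega
  have hsq : ∀ j : Int, (((j - cx).natAbs ^ 2 : Nat) : Int) = (j - cx) ^ 2 := by
    intro j; push_cast; exact sq_abs _
  have key : ∀ j : Int, (q + (j - cx) ^ 2 ≤ r * r) ↔ ((j - cx).natAbs ≤ dxN) := by
    intro j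
    rw [hdx, Nat.le_sqrt']
    constructor
    · intro h
      have h4 : (((j - cx).natAbs ^ 2 : Nat) : Int) ≤ r * r - q := by rw [hsq]; omega
      omega
    · intro h
      have h4 : (((j - cx).natAbs ^ 2 : Nat) : Int) ≤ r * r - q := by omega
      rw [hsq] at h4
      omega
  have hdxr : (dxN : Int) ≤ r := by
    have h1 : dxN ^ 2 ≤ (r * r - q).toNat := by rw [hdx]; exact Nat.sqrt_le' _
    have h2 : ((dxN ^ 2 : Nat) : Int) ≤ r * r - q := by omega
    push_cast at h2
    nlinarith [h2, hq0, hr, Int.natCast_nonneg dxN]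
  have hdx0 : (0 : Int) ≤ (dxN : Int) := Int.natCast_nonneg _
  rw [PySem.List.pyRange_one_append (cx - r) (cx - dxN) (cx + r + 1) (by omega) (by omega),
    PySem.List.pyRange_one_append (cx - (dxN : Int)) (cx + dxN + 1) (cx + r + 1) (by omega) (by omega),
    List.foldl_append, List.foldl_append]
  rw [pvFoldl_if_false _ _ f d ?hl]
  case hl =>
    intro x hx
    rw [PySem.List.mem_pyRange_one] at hx
    rw [key]
    omega
  rw [pvFoldl_if_true _ _ f d ?hm]
  case hm =>
    intro x hx
    rw [PySem.List.mem_pyRange_one] at hx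
    rw [key]
    omega
  rw [pvFoldl_if_false _ _ f _ ?hr2]
  case hr2 =>
    intro x hx
    rw [PySem.List.mem_pyRange_one] at hx
    rw [key]
    omega

-- ===== VERDICT (by name: the statement is the Claim_ definition above) =====
theorem mask_circle_spec : Claim_equal_mask_circle := by
  intro data centre radius _ _
  unfold Spec_mask_circle mask_circle mask_circle_alt
  apply pvFoldl_congr
  intro d i hi
  rw [PySem.List.mem_pyRange_one] at hi
  have hr : (0 : Int) ≤ radius := by omega
  have hq0 : (0 : Int) ≤ (i - centre.2) ^ 2 := sq_nonneg _
  have hqr : (i - centre.2) ^ 2 ≤ radius * radius := by nlinarith [hi.1, hi.2]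
  have hrem : ¬ (radius * radius - (i - centre.2) * (i - centre.2) < 0) := by nlinarith [hqr]
  rw [if_neg hrem]
  rw [pvIsqrt_eq]
  have h := pvRow (β := List (List Int)) centre.1 radius ((i - centre.2) ^ 2) hq0 hqr hr
    (fun d j => pvSet2 d i j) d
  rw [show radius * radius - (i - centre.2) ^ 2
      = radius * radius - (i - centre.2) * (i - centre.2) by ring] at h
  exact h
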